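-- pv_equiv track=rewrite | github.com/jongwow/algorithm | leetcode/ransom-note.py | canConstruct
-- ===== SOURCE A (Python) =====
-- def canConstruct(ransomNote: str, magazine: str) -> bool:
--     dictionary = {}
--     for ch in magazine:
--         if ch in dictionary:
--             dictionary[ch] += 1
--         else:
--             dictionary[ch] = 1
--     for ch in ransomNote:
--         if ch in dictionary:
--             dictionary[ch] -= 1
--             if dictionary[ch] == 0:
--                 del dictionary[ch]
--         else:
--             return False
--     return True
-- ===== SOURCE B (Python) =====
-- def canConstruct(ransomNote: str, magazine: str) -> bool:
--     return all(
--         sum(1 for c in ransomNote if c == ch) <= sum(1 for c in magazine if c == ch)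
--         for ch in set(ransomNote)
--     )
-- ===== Notes on version B (the rewrite author's own statement) =====
-- stated objective: simpler
-- what changed: Replaces the mutable counting dict with delete-on-zero bookkeeping and an early-exit decrement loop by a single order-independent multiset comparison: for each distinct note character, compare its count in the note with its count in the magazine.
import Mathlib
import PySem

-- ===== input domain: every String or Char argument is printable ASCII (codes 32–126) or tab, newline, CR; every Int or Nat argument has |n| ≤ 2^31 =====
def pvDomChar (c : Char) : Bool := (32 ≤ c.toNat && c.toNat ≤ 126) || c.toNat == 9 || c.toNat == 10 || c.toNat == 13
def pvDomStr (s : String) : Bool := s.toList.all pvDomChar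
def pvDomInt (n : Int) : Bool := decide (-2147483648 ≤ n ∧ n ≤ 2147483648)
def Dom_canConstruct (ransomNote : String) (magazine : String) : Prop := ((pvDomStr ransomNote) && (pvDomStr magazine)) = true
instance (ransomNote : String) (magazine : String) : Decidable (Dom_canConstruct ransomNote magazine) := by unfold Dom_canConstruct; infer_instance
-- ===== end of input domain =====

-- B replaces A's mutable decrement-and-delete dict scan with a per-character multiset comparison (simpler; not faster).

-- ===== PORT A =====
-- first loop of A: build the magazine frequency dict
def pvBuild (m : List Char) : PySem.Dict Char Int :=
  m.foldl (fun d c => if d.contains c then d.insert c (d.getD c 0 + 1) else d.insert c 1)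
    PySem.Dict.empty

-- second loop of A: consume the note, early-returning False on a missing letter
def pvConsume : List Char → PySem.Dict Char Int → Bool
  | [], _ => true
  | c :: rest, d =>
    if d.contains c then
      let d1 := d.insert c (d.getD c 0 - 1)
      if d1.getD c 0 == 0 then pvConsume rest (d1.erase c) else pvConsume rest d1
    else false

def canConstruct (ransomNote : String) (magazine : String) : Bool :=
  pvConsume ransomNote.toList (pvBuild magazine.toList)

-- ===== PORT B =====
-- sum(1 for c in s if c == ch)
def pvCountEq (s : List Char) (ch : Char) : Int :=
  s.foldl (fun a c => if c == ch then a + 1 else a) 0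

def canConstruct_alt (ransomNote : String) (magazine : String) : Bool :=
  (PySem.Set.ofList ransomNote.toList).all
    (fun ch => decide (pvCountEq ransomNote.toList ch ≤ pvCountEq magazine.toList ch))

-- ===== PRECONDITION & SPEC =====
def Spec_canConstruct (ransomNote : String) (magazine : String) (out : Bool) : Prop := out = canConstruct_alt ransomNote magazine
instance (ransomNote : String) (magazine : String) (out : Bool) : Decidable (Spec_canConstruct ransomNote magazine out) := by unfold Spec_canConstruct; infer_instance

-- ===== CLAIM (what is proved, stated in full; the proofs are below) =====
def Claim_equal_canConstruct : Prop := ∀ (ransomNote : String) (magazine : String), Dom_canConstruct ransomNote magazine → Spec_canConstruct ransomNote magazine (canConstruct ransomNote magazine)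

-- ===== LEMMAS AND PROOFS =====

lemma pvBuild_step_eq :
    (fun (d : PySem.Dict Char Int) c => if d.contains c then d.insert c (d.getD c 0 + 1) else d.insert c 1)
      = fun d c => d.insert c (d.getD c 0 + 1) := by
  funext d c
  by_cases h : d.contains c = true
  · simp [h]
  · have hb : d.contains c = false := by simpa using h
    have hget : d.get? c = none := (PySem.Dict.get?_eq_none_iff_contains d c).mpr hb
    simp [hb, PySem.Dict.getD, hget]

lemma pvGet?_erase (d : PySem.Dict Char Int) (k x : Char) :
    (d.erase k).get? x = if x = k then none else d.get? x := by
  obtain ⟨l⟩ := d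
  induction l with
  | nil => simp [PySem.Dict.erase, PySem.Dict.get?]
  | cons p rest ih =>
    simp only [PySem.Dict.erase, PySem.Dict.get?] at *
    by_cases h1 : p.1 = k
    · have hpk : (p.1 == k) = true := by simpa using h1
      have hf : List.filter (fun p => !p.1 == k) (p :: rest)
          = List.filter (fun p => !p.1 == k) rest := by
        simp [hpk]
      rw [hf, ih]
      by_cases h2 : x = k
      · simp [h2]
      · have hpx : (p.1 == x) = false := by
          subst h1; simpa using fun he => h2 he.symm
        simp [hpx, h2]
    · have hpk : (p.1 == k) = false := by simpa using h1
      have hf : List.filter (fun p => !p.1 == k) (p :: rest)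
          = p :: List.filter (fun p => !p.1 == k) rest := by
        simp [hpk]
      rw [hf]
      by_cases hpx : p.1 = x
      · have hxk : ¬ x = k := fun he => h1 (hpx.trans he)
        simp [(by simpa using hpx : (p.1 == x) = true), hxk]
      · have hpx' : (p.1 == x) = false := by simpa using hpx
        simp only [List.find?_cons, hpx']
        exact ih

lemma pvBuild_get? (m : List Char) (c : Char) :
    (pvBuild m).get? c = if List.count c m = 0 then none else some ((List.count c m : Nat) : Int) := by
  have hkeys : (pvBuild m).keys = PySem.Set.ofList m := by
    unfold pvBuild
    rw [pvBuild_step_eq, PySem.Dict.keys_foldl_insert]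
    simp [PySem.Set.update]
    rfl
  have hgetD : (pvBuild m).getD c 0 = (List.count c m : Int) := by
    unfold pvBuild
    rw [pvBuild_step_eq, PySem.Dict.getD_foldl_insert_add_one]
    simp [PySem.Dict.getD, PySem.Dict.get?, PySem.Dict.empty]
  by_cases hc : List.count c m = 0
  · have hnm : c ∉ m := by
      intro hm
      exact absurd hc (by simpa using List.count_pos_iff.mpr hm |>.ne')
    have hk : c ∉ (pvBuild m).keys := by
      rw [hkeys]; simpa [PySem.Set.mem_ofList] using hnm
    simp [hc, (PySem.Dict.get?_eq_none_iff_not_mem_keys _ _).mpr hk]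
  · have hm : c ∈ m := by
      by_contra hn
      exact hc (List.count_eq_zero.mpr hn)
    have hk : c ∈ (pvBuild m).keys := by
      rw [hkeys]; simpa [PySem.Set.mem_ofList] using hm
    have hsome : ((pvBuild m).get? c).isSome = true := by
      rw [← PySem.Dict.contains_eq_isSome_get?, PySem.Dict.contains_eq_decide_mem_keys]
      simpa using hk
    obtain ⟨v, hv⟩ := Option.isSome_iff_exists.mp hsome
    have hveq : v = (List.count c m : Int) := by
      have h2 := hgetD
      rw [PySem.Dict.getD, hv] at h2
      simpa using h2
    simp [hc, hv, hveq]

-- invariant of A's consuming loop: if the dict realises the remaining-budget function f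
-- (absent exactly where the budget is 0), the loop decides "the note fits in f"
lemma pvConsume_spec (note : List Char) (d : PySem.Dict Char Int) (f : Char → Nat)
    (h : ∀ c, d.get? c = if f c = 0 then none else some ((f c : Nat) : Int)) :
    (pvConsume note d = true ↔ ∀ c, List.count c note ≤ f c) := by
  induction note generalizing d f with
  | nil => simp [pvConsume]
  | cons c rest ih =>
    by_cases hc : f c = 0
    · have hcont : d.contains c = false := by
        rw [PySem.Dict.contains_eq_isSome_get?, h c]; simp [hc]
      simp only [pvConsume, hcont, Bool.false_eq_true, if_false]
      constructor
      · intro hfalse; exact absurd hfalse (by simp)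
      · intro hall
        have := hall c
        simp [hc] at this
    · have hcont : d.contains c = true := by
        rw [PySem.Dict.contains_eq_isSome_get?, h c]; simp [hc]
      have hgetD : d.getD c 0 = ((f c : Nat) : Int) := by
        rw [PySem.Dict.getD, h c]; simp [hc]
      set d1 := d.insert c (d.getD c 0 - 1) with hd1
      have hget1 : ∀ x, d1.get? x = if x = c then some ((f c : Int) - 1) else d.get? x := by
        intro x
        by_cases hx : x = c
        · subst hx; simp [hd1, PySem.Dict.get?_insert_self, hgetD]
        · rw [hd1, PySem.Dict.get?_insert_of_ne _ _ hx, if_neg hx]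
      have hgetD1 : d1.getD c 0 = (f c : Int) - 1 := by
        rw [PySem.Dict.getD, hget1 c]; simp
      set f' : Char → Nat := fun x => if x = c then f c - 1 else f x with hf'
      have hiff : (∀ x, List.count x rest ≤ f' x) ↔ (∀ x, List.count x (c :: rest) ≤ f x) := by
        constructor
        · intro hall x
          have := hall x
          by_cases hx : x = c
          · subst hx
            simp only [hf', if_pos rfl] at this
            simp
            omega
          · simp only [hf', if_neg hx] at this
            have hne : ¬ c = x := fun he => hx he.symm
            simpa [List.count_cons, hne] using this
        · intro hall x
          have := hall x
          by_cases hx : x = c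
          · subst hx
            simp only [List.count_cons] at this
            simp only [hf', if_pos rfl]
            simp at this
            omega
          · simp only [hf', if_neg hx]
            have hne : ¬ c = x := fun he => hx he.symm
            simpa [List.count_cons, hne] using this
      by_cases h1 : f c = 1
      · have hz : (d1.getD c 0 == 0) = true := by simp [hgetD1, h1]
        have hinv : ∀ x, (d1.erase c).get? x = if f' x = 0 then none else some ((f' x : Nat) : Int) := by
          intro x
          rw [pvGet?_erase]
          by_cases hx : x = c
          · simp [hx, hf', h1]
          · rw [if_neg hx, hget1 x, if_neg hx, h x]
            simp [hf', hx]
        simp only [pvConsume, hcont, if_true, ← hd1, hz]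
        rw [ih _ _ hinv, hiff]
      · have hz : (d1.getD c 0 == 0) = false := by
          rw [hgetD1]; simp; omega
        have hinv : ∀ x, d1.get? x = if f' x = 0 then none else some ((f' x : Nat) : Int) := by
          intro x
          rw [hget1 x]
          by_cases hx : x = c
          · have hnz : f c - 1 ≠ 0 := by omega
            simp only [hx, if_pos rfl, hf']
            simp [hnz]
            omega
          · rw [if_neg hx, h x]; simp [hf', hx]
        simp only [pvConsume, hcont, if_true, ← hd1, hz, Bool.false_eq_true, if_false]
        rw [ih _ _ hinv, hiff]

lemma pvCountEq_eq (s : List Char) (ch : Char) : pvCountEq s ch = (List.count ch s : Int) := by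
  unfold pvCountEq
  rw [PySem.List.foldl_beq_add_one]
  simp

lemma alt_iff (r m : String) :
    canConstruct_alt r m = true ↔ ∀ c, List.count c r.toList ≤ List.count c m.toList := by
  unfold canConstruct_alt
  rw [List.all_eq_true]
  constructor
  · intro hall c
    by_cases hc : c ∈ r.toList
    · have := hall c (by simpa [PySem.Set.mem_ofList] using hc)
      simp [pvCountEq_eq] at this
      exact_mod_cast this
    · simp [List.count_eq_zero.mpr hc]
  · intro hall c _
    simp [pvCountEq_eq]
    exact_mod_cast hall c

-- ===== VERDICT (by name: the statement is the Claim_ definition above) =====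
theorem canConstruct_spec : Claim_equal_canConstruct := by
  intro r m _
  unfold Spec_canConstruct
  have hA : canConstruct r m = true ↔ ∀ c, List.count c r.toList ≤ List.count c m.toList := by
    unfold canConstruct
    exact pvConsume_spec r.toList (pvBuild m.toList) (fun c => List.count c m.toList)
      (fun c => pvBuild_get? m.toList c)
  have hB := alt_iff r m
  cases ha : canConstruct r m with
  | true => exact (hB.mpr (hA.mp ha)).symm
  | false =>
    cases hb : canConstruct_alt r m with
    | true => exact absurd (hA.mpr (hB.mp hb)) (by simp [ha])
    | false => rfl
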